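-- pv_equiv track=rewrite | github.com/reverbdotcom/code_extension | data/python/app/app.py | get_url_counts
-- ===== SOURCE A (Python) =====
-- def get_url_counts(events=[]):
--     urls_with_count = {}
--     for event in events:
--         url = event.get('url')
--         if urls_with_count.get(url) is None:
--             urls_with_count[url] = 0
--         else:
--             urls_with_count[url] += 1
--     return urls_with_count
-- ===== SOURCE B (Python) =====
-- def get_url_counts(events=[]):
--     # No running tally: extract the url stream once, take its distinct keys in
--     # first-appearance order, and compute each key's value by rescanning the
--     # stream with list.count (minus one: the first occurrence counts as 0).
--     urls = [event.get('url') for event in events]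
--     return {u: urls.count(u) - 1 for u in dict.fromkeys(urls)}
-- ===== Notes on version B (the rewrite author's own statement) =====
-- stated objective: alternative
-- what changed: Replaces A's single-pass conditional tally dict by a staged computation with no running counter: materialise the url stream, deduplicate it in first-appearance order, and obtain each key's value by a per-key list.count rescan minus one.
import Mathlib
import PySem

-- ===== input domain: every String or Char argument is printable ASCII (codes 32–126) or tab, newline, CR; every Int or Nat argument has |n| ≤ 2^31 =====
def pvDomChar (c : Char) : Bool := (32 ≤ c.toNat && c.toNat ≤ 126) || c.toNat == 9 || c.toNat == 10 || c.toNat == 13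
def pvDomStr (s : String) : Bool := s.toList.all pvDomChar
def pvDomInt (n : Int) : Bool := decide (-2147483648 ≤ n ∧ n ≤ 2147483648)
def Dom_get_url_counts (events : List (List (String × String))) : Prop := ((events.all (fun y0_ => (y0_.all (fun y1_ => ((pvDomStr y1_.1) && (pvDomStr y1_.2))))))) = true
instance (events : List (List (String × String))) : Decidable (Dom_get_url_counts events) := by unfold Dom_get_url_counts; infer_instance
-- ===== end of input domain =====

-- B drops A's running tally dict entirely: it extracts the url stream, deduplicates it in
-- first-appearance order, and computes each key's value by a per-key count rescan minus one
-- (alternative decomposition; same return value).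

-- ===== PORT A =====
-- loop body of A: url = event.get('url'); if absent insert 0, else increment
def pvStepA (d : PySem.Dict (Option String) Int) (url : Option String) :
    PySem.Dict (Option String) Int :=
  match d.get? url with
  | none => d.insert url 0
  | some v => d.insert url (v + 1)

def get_url_counts (events : List (List (String × String))) : List (Option String × Int) :=
  (events.foldl (fun d event => pvStepA d (event.lookup "url")) PySem.Dict.empty).items

-- ===== PORT B =====
def get_url_counts_alt (events : List (List (String × String))) : List (Option String × Int) :=
  let urls := events.map (fun event => event.lookup "url")
  (PySem.Set.ofList urls).map (fun u => (u, (urls.count u : Int) - 1))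

-- ===== PRECONDITION & SPEC =====
def Spec_get_url_counts (events : List (List (String × String))) (out : List (Option String × Int)) : Prop := out = get_url_counts_alt events
instance (events : List (List (String × String))) (out : List (Option String × Int)) : Decidable (Spec_get_url_counts events out) := by unfold Spec_get_url_counts; infer_instance

-- ===== CLAIM (what is proved, stated in full; the proofs are below) =====
def Claim_equal_get_url_counts : Prop := ∀ (events : List (List (String × String))), Dom_get_url_counts events → Spec_get_url_counts events (get_url_counts events)

-- ===== LEMMAS AND PROOFS =====

-- A's loop, seen over the list of urls, produces the "count minus one" table directly.
lemma pvFoldA_items (l : List (Option String)) :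
    (l.foldl pvStepA PySem.Dict.empty).items
      = (PySem.Set.ofList l).map (fun k => (k, (l.count k : Int) - 1)) := by
  induction l using List.reverseRecOn with
  | nil => rfl
  | append_singleton l u ih =>
    rw [List.foldl_append, List.foldl_cons, List.foldl_nil]
    set d := l.foldl pvStepA PySem.Dict.empty with hd
    have hkeys : d.keys = PySem.Set.ofList l := by
      simp [PySem.Dict.keys, ih, List.map_map, Function.comp_def]
    have hnd : d.keys.Nodup := by rw [hkeys]; exact PySem.Set.nodup_ofList l
    rw [PySem.Set.ofList_append_singleton]
    by_cases hu : u ∈ l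
    · have hmem : (u, ((l.count u : Int) - 1)) ∈ d.items := by
        rw [ih]
        exact List.mem_map_of_mem ((PySem.Set.mem_ofList l u).mpr hu)
      have hget : d.get? u = some ((l.count u : Int) - 1) :=
        PySem.Dict.get?_of_mem_items d hmem hnd
      have hc : d.contains u = true := by
        rw [PySem.Dict.contains_iff_mem_keys, hkeys]
        exact (PySem.Set.mem_ofList l u).mpr hu
      rw [pvStepA, hget, PySem.Dict.items_insert_of_contains d _ hc,
          PySem.Set.add_of_mem ((PySem.Set.mem_ofList l u).mpr hu), ih, List.map_map]
      refine List.map_congr_left (fun k hk => ?_)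
      by_cases hku : k = u
      · subst hku
        simp [List.count_append]
      · simp [Function.comp, List.count_append, hku, Ne.symm hku]
    · have hc : d.contains u = false := by
        rw [PySem.Dict.contains_eq_decide_mem_keys, hkeys]
        simpa using hu
      have hget : d.get? u = none := by
        rw [PySem.Dict.get?_eq_none_iff_contains]; exact hc
      have hcnt : l.count u = 0 := List.count_eq_zero.mpr hu
      rw [pvStepA, hget, PySem.Dict.items_insert_of_not_contains d _ hc,
          PySem.Set.add_of_not_mem (by simpa using hu), List.map_append, ih]
      have h2 : List.map (fun k => ((k, ((l ++ [u]).count k : Int) - 1) : Option String × Int)) [u]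
          = [(u, 0)] := by simp [List.count_append, hcnt]
      have h1 : (PySem.Set.ofList l).map
            (fun k => ((k, (l.count k : Int) - 1) : Option String × Int))
          = (PySem.Set.ofList l).map (fun k => (k, ((l ++ [u]).count k : Int) - 1)) := by
        refine List.map_congr_left (fun k hk => ?_)
        have hku : k ≠ u := fun h => hu (h ▸ (PySem.Set.mem_ofList l k).mp hk)
        simp [List.count_append, Ne.symm hku]
      rw [h1, h2]

-- ===== VERDICT (by name: the statement is the Claim_ definition above) =====
theorem get_url_counts_spec : Claim_equal_get_url_counts := by
  intro events _
  show get_url_counts events = get_url_counts_alt events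
  unfold get_url_counts get_url_counts_alt
  have hA : (events.foldl (fun d event => pvStepA d (event.lookup "url")) PySem.Dict.empty)
      = ((events.map (fun e => e.lookup "url")).foldl pvStepA PySem.Dict.empty) :=
    (List.foldl_map (f := fun e : List (String × String) => e.lookup "url")
      (g := pvStepA) (l := events) (init := PySem.Dict.empty)).symm
  rw [hA, pvFoldA_items]
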